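-- pv_equiv track=rewrite | github.com/Haksell/codeforces | 1559B.py | solve
-- ===== SOURCE A (Python) =====
-- from itertools import groupby
--
-- def solve(n, s):
--     groups = [(k, list(v)) for k, v in groupby(s, key=("?".__eq__))]
--     if len(groups) == 1:
--         return "".join("R" if i & 1 else "B" for i in range(n)) if groups[0][0] else s
--     s = list(s)
--     si = 0
--     for gi, (k, v) in enumerate(groups):
--         if not k:
--             last = v[-1]
--         elif gi == 0:
--             ch = s[len(v)]
--             for j in range(len(v)):
--                 ch = "R" if ch == "B" else "B"
--                 s[len(v) - j - 1] = ch
--         else: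
--             ch = last
--             for j in range(len(v)):
--                 ch = "R" if ch == "B" else "B"
--                 s[si + j] = ch
--         si += len(v)
--     return "".join(s)
-- ===== SOURCE B (Python) =====
-- def solve(n, s):
--     if '?' not in s:
--         return s
--     t = list(s)
--     p = 0
--     while p < len(t) and t[p] == '?':
--         p += 1
--     if p == len(t):  # s consists only of '?'
--         return "".join("R" if i & 1 else "B" for i in range(n))
--     i = p
--     while i > 0:  # fill the leading '?'s backward from the first fixed char
--         i -= 1
--         t[i] = "R" if t[i + 1] == "B" else "B"
--     i = p + 1
--     while i < len(t):  # one forward pass: fill each '?' from its left neighbour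
--         if t[i] == "?":
--             t[i] = "R" if t[i - 1] == "B" else "B"
--         i += 1
--     return "".join(t)
-- ===== Notes on version B (the rewrite author's own statement) =====
-- stated objective: simpler
-- what changed: Replaced the itertools.groupby group decomposition and per-group index bookkeeping (si, last, enumerate) by a direct scan: find the first fixed character, fill the leading '?'s backward from it, then one forward pass filling each '?' from its left neighbour.
import Mathlib
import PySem

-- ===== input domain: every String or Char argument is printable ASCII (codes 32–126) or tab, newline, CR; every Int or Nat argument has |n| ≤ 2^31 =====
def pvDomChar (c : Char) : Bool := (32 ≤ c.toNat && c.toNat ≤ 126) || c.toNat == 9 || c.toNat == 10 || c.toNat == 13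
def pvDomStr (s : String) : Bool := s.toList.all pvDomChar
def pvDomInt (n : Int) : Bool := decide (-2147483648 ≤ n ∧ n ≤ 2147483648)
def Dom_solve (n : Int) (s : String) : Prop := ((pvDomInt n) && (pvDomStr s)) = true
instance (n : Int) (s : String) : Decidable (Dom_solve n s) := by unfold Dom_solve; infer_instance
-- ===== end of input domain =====

-- B replaces A's groupby-based group bookkeeping by a direct scan: fill leading '?'s
-- backward from the first fixed char, then one forward pass (objective: simpler).

-- ===== PORT A =====
-- 'R' if ch == 'B' else 'B'  (the inline conditional both Pythons use)
def flipC (ch : Char) : Char := if ch == 'B' then 'R' else 'B'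

-- [(k, list(v)) for k, v in groupby(s, key=("?".__eq__))]
def gbQ (l : List Char) : List (Bool × List Char) :=
  match l with
  | [] => []
  | c :: rest =>
    let k := c == '?'
    (k, c :: rest.takeWhile (fun x => (x == '?') == k)) ::
      gbQ (rest.dropWhile (fun x => (x == '?') == k))
termination_by l.length
decreasing_by
  have := List.length_dropWhile_le (fun x => (x == '?') == (c == '?')) rest
  simp; omega

-- the body of A's 'for gi, (k, v) in enumerate(groups)' loop; state = (s, si, last)
def stepA (st : List Char × Nat × Char) (g : Int × Bool × List Char) : List Char × Nat × Char :=
  let arr := st.1; let si := st.2.1; let last := st.2.2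
  let gi := g.1; let k := g.2.1; let v := g.2.2
  if !k then
    (arr, si + v.length, v.getLastD 'B')        -- last = v[-1]; v nonempty by groupby construction
  else if gi == 0 then
    let res := (List.range v.length).foldl
      (fun (ac : List Char × Char) j =>
        let ch := flipC ac.2
        (ac.1.set (v.length - j - 1) ch, ch))
      (arr, arr.getD v.length 'B')              -- ch = s[len(v)]; in range: there are ≥ 2 groups
    (res.1, si + v.length, last)
  else
    let res := (List.range v.length).foldl
      (fun (ac : List Char × Char) j =>
        let ch := flipC ac.2
        (ac.1.set (si + j) ch, ch))
      (arr, last)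
    (res.1, si + v.length, last)

def solve (n : Int) (s : String) : String :=
  let groups := gbQ s.toList
  if groups.length == 1 then
    if (groups.getD 0 (false, [])).1 then
      String.mk ((PySem.List.pyRange 0 n 1).map (fun i => if PySem.Int.mod i 2 == 1 then 'R' else 'B'))
    else s
  else
    let st := (PySem.List.enumerate groups 0).foldl stepA (s.toList, 0, 'B')
    String.mk st.1

-- ===== PORT B =====
-- p = 0; while p < len(t) and t[p] == '?': p += 1
def findP : List Char → Nat
  | [] => 0
  | c :: r => if c == '?' then findP r + 1 else 0

-- i = p; while i > 0: i -= 1; t[i] = flip(t[i+1])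
def backLoop (t : List Char) : Nat → List Char
  | 0 => t
  | i + 1 => backLoop (t.set i (flipC (t.getD (i + 1) 'B'))) i

-- i = p+1; while i < len(t): (fill t[i] from t[i-1] if '?'); i += 1
def fwdLoop (t : List Char) (i : Nat) : List Char :=
  if h : i < t.length then
    if t.getD i 'B' == '?' then fwdLoop (t.set i (flipC (t.getD (i - 1) 'B'))) (i + 1)
    else fwdLoop t (i + 1)
  else t
termination_by t.length - i
decreasing_by
  · simp only [List.length_set]; omega
  · omega

def solve_alt (n : Int) (s : String) : String :=
  if !s.toList.contains '?' then s
  else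
    let t := s.toList
    let p := findP t
    if p == t.length then
      String.mk ((PySem.List.pyRange 0 n 1).map (fun i => if PySem.Int.mod i 2 == 1 then 'R' else 'B'))
    else
      String.mk (fwdLoop (backLoop t p) (p + 1))

-- ===== PRECONDITION & SPEC =====
def Spec_solve (n : Int) (s : String) (out : String) : Prop := out = solve_alt n s
instance (n : Int) (s : String) (out : String) : Decidable (Spec_solve n s out) := by unfold Spec_solve; infer_instance

-- ===== CLAIM (what is proved, stated in full; the proofs are below) =====
def Claim_equal_solve : Prop := ∀ (n : Int) (s : String), Dom_solve n s → Spec_solve n s (solve n s)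

-- ===== LEMMAS AND PROOFS =====

-- the result of filling each '?' from its (already filled) left neighbour, prev being the char left of the list
def fillF (prev : Char) : List Char → List Char
  | [] => []
  | c :: r =>
    let c' := if c == '?' then flipC prev else c
    c' :: fillF c' r

-- the common normal form of both programs on a mixed string (p = index of the first fixed char)
def target (cs : List Char) (p : Nat) : List Char :=
  (fillF (cs.getD p 'B') (List.replicate p '?')).reverse ++ fillF 'B' (cs.drop p)

-- index-free version of A's loop body (the enumerate index only distinguishes gi = 0)
def stepA' (st : List Char × Nat × Char) (g : Bool × List Char) : List Char × Nat × Char :=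
  if !g.1 then
    (st.1, st.2.1 + g.2.length, g.2.getLastD 'B')
  else
    let res := (List.range g.2.length).foldl
      (fun (ac : List Char × Char) j =>
        let ch := flipC ac.2
        (ac.1.set (st.2.1 + j) ch, ch))
      (st.1, st.2.2)
    (res.1, st.2.1 + g.2.length, st.2.2)

theorem length_fillF (p : Char) (l : List Char) : (fillF p l).length = l.length := by
  induction l generalizing p with
  | nil => rfl
  | cons c r ih => simp [fillF, ih]

theorem fillF_fixed (p : Char) (v : List Char) (h : ∀ x ∈ v, (x == '?') = false) :
    fillF p v = v := by
  induction v generalizing p with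
  | nil => rfl
  | cons c r ih =>
    have hc := h c (by simp)
    simp [fillF, hc, ih c (fun x hx => h x (by simp [hx]))]

theorem fillF_indep (a b : Char) (l : List Char)
    (h : ∀ c, l.head? = some c → (c == '?') = false) : fillF a l = fillF b l := by
  cases l with
  | nil => rfl
  | cons c r => have := h c rfl; simp [fillF, this]

theorem fillF_append (p : Char) (u v : List Char) :
    fillF p (u ++ v) = fillF p u ++ fillF ((fillF p u).getLastD p) v := by
  induction u generalizing p with
  | nil => simp [fillF]
  | cons c r ih =>
    simp only [List.cons_append, fillF]
    rw [ih, List.getLastD_cons]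

theorem chain_succ (p : Char) (k : Nat) :
    fillF p (List.replicate (k + 1) '?') = flipC p :: fillF (flipC p) (List.replicate k '?') := by
  simp [List.replicate_succ, fillF]

theorem chain_snoc (p : Char) (k : Nat) :
    fillF p (List.replicate (k + 1) '?') = fillF p (List.replicate k '?') ++ [flipC^[k + 1] p] := by
  induction k generalizing p with
  | zero => simp [chain_succ, fillF]
  | succ k ih =>
    rw [chain_succ, ih, chain_succ]
    simp [Function.iterate_succ_apply]

theorem chain_getLastD (p : Char) (k : Nat) :
    (fillF p (List.replicate k '?')).getLastD p = flipC^[k] p := by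
  cases k with
  | zero => rfl
  | succ k => rw [chain_snoc]; simp

theorem findP_le (l : List Char) : findP l ≤ l.length := by
  induction l with
  | nil => simp [findP]
  | cons c r ih =>
    by_cases h : (c == '?') = true <;> simp [findP, h] <;> omega

theorem take_findP (l : List Char) : l.take (findP l) = List.replicate (findP l) '?' := by
  induction l with
  | nil => simp [findP]
  | cons c r ih =>
    by_cases h : (c == '?') = true
    · have hc : c = '?' := by simpa using h
      simp [findP, h, hc, List.replicate_succ, ih]
    · simp [findP, h]

theorem getD_findP (l : List Char) (h : findP l < l.length) :
    (l.getD (findP l) 'B' == '?') = false := by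
  induction l with
  | nil => simp at h
  | cons c r ih =>
    by_cases hc : (c == '?') = true
    · rw [show findP (c :: r) = findP r + 1 from by simp [findP, hc]] at h ⊢
      rw [List.getD_cons_succ]
      exact ih (by simp at h; omega)
    · rw [show findP (c :: r) = 0 from by simp [findP, hc]]
      rw [List.getD_cons_zero]
      simpa using hc

theorem findP_all_q (l : List Char) (h : ∀ x ∈ l, x = '?') : findP l = l.length := by
  induction l with
  | nil => rfl
  | cons c r ih =>
    have : c = '?' := h c (by simp)
    simp [findP, this, ih (fun x hx => h x (by simp [hx]))]

theorem takeWhile_q (l : List Char) :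
    l.takeWhile (fun x => x == '?') = List.replicate (findP l) '?' := by
  induction l with
  | nil => rfl
  | cons c r ih =>
    by_cases h : (c == '?') = true
    · have hc : c = '?' := by simpa using h
      simp [List.takeWhile_cons, h, findP, ih, List.replicate_succ, hc]
    · simp [List.takeWhile_cons, h, findP]

theorem dropWhile_q (l : List Char) :
    l.dropWhile (fun x => x == '?') = l.drop (findP l) := by
  induction l with
  | nil => rfl
  | cons c r ih =>
    by_cases h : (c == '?') = true
    · simp [List.dropWhile_cons, h, findP, ih]
    · simp [List.dropWhile_cons, h, findP]

theorem gbQ_nil : gbQ [] = [] := by rw [gbQ]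

theorem gbQ_cons (c : Char) (rest : List Char) :
    gbQ (c :: rest) = ((c == '?'), c :: rest.takeWhile (fun x => (x == '?') == (c == '?'))) ::
      gbQ (rest.dropWhile (fun x => (x == '?') == (c == '?'))) := by
  rw [gbQ]

theorem gbQ_eq_nil (l : List Char) (h : gbQ l = []) : l = [] := by
  cases l with
  | nil => rfl
  | cons c rest => rw [gbQ_cons] at h; cases h

theorem gbQ_all (l : List Char) (k : Bool) (hne : l ≠ []) (h : ∀ x ∈ l, (x == '?') = k) :
    gbQ l = [(k, l)] := by
  cases l with
  | nil => exact absurd rfl hne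
  | cons c rest =>
    have hc : (c == '?') = k := h c (by simp)
    rw [gbQ_cons, hc]
    have ht : rest.takeWhile (fun x => (x == '?') == k) = rest :=
      List.takeWhile_eq_self_iff.mpr (fun x hx => by simp [h x (List.mem_cons_of_mem _ hx)])
    have hd : rest.dropWhile (fun x => (x == '?') == k) = [] :=
      List.dropWhile_eq_nil_iff.mpr (fun x hx => by simp [h x (List.mem_cons_of_mem _ hx)])
    rw [ht, hd, gbQ_nil]

theorem gbQ_single_key (l : List Char) (k : Bool) (v : List Char)
    (h : gbQ l = [(k, v)]) : ∀ x ∈ l, (x == '?') = k := by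
  cases l with
  | nil => simp
  | cons c rest =>
    rw [gbQ_cons] at h
    injection h with hhead htail
    have h1 : (c == '?') = k := congrArg Prod.fst hhead
    have h3 := List.dropWhile_eq_nil_iff.mp (gbQ_eq_nil _ htail)
    intro x hx
    rcases List.mem_cons.mp hx with rfl | hx
    · exact h1
    · have hxx : (x == '?') = (c == '?') := eq_of_beq (h3 x hx)
      rw [hxx, h1]

theorem stepA_ne_zero (st : List Char × Nat × Char) (j : Int) (k : Bool) (v : List Char)
    (hj : j ≠ 0) : stepA st (j, k, v) = stepA' st (k, v) := by
  simp [stepA, stepA', hj]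

theorem foldl_enum (gs : List (Bool × List Char)) :
    ∀ (st : List Char × Nat × Char) (j : Int), 1 ≤ j →
    (PySem.List.enumerate gs j).foldl stepA st = gs.foldl stepA' st := by
  induction gs with
  | nil => intro st j hj; simp [PySem.List.enumerate_nil]
  | cons g rest ih =>
    intro st j hj
    obtain ⟨k, v⟩ := g
    rw [PySem.List.enumerate_cons]
    simp only [List.foldl_cons]
    rw [stepA_ne_zero st j k v (by omega), ih _ (j + 1) (by omega)]

theorem loopA_fwd (k : Nat) (keep rest : List Char) (ch : Char) (hk : k ≤ rest.length) :
    (List.range k).foldl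
      (fun (ac : List Char × Char) j => (ac.1.set (keep.length + j) (flipC ac.2), flipC ac.2))
      (keep ++ rest, ch)
    = (keep ++ fillF ch (List.replicate k '?') ++ rest.drop k, flipC^[k] ch) := by
  induction k with
  | zero => simp [fillF]
  | succ k ih =>
    rw [List.range_succ, List.foldl_append, ih (by omega)]
    simp only [List.foldl_cons, List.foldl_nil]
    have hklt : k < rest.length := by omega
    have hlen : (keep ++ fillF ch (List.replicate k '?')).length = keep.length + k := by
      simp [length_fillF]
    have hset : (keep ++ fillF ch (List.replicate k '?') ++ rest.drop k).set
        (keep.length + k) (flipC (flipC^[k] ch))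
        = keep ++ fillF ch (List.replicate (k + 1) '?') ++ rest.drop (k + 1) := by
      rw [List.set_append, hlen, if_neg (by omega)]
      rw [List.drop_eq_getElem_cons hklt]
      have : keep.length + k - (keep.length + k) = 0 := by omega
      rw [this, List.set_cons_zero, chain_snoc]
      simp [List.append_assoc, Function.iterate_succ_apply']
    rw [hset]
    simp [Function.iterate_succ_apply']

theorem loopA_back_aux (p : Nat) (pre rest : List Char) (hp : pre.length = p) (ch0 : Char) :
    ∀ m ≤ p,
    (List.range m).foldl
      (fun (ac : List Char × Char) j => (ac.1.set (p - j - 1) (flipC ac.2), flipC ac.2))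
      (pre ++ rest, ch0)
    = (pre.take (p - m) ++ (fillF ch0 (List.replicate m '?')).reverse ++ rest, flipC^[m] ch0) := by
  intro m
  induction m with
  | zero =>
    intro _
    rw [Nat.sub_zero, ← hp, List.take_length]
    simp [fillF]
  | succ m ih =>
    intro hm
    rw [List.range_succ, List.foldl_append, ih (by omega)]
    simp only [List.foldl_cons, List.foldl_nil]
    have h1 : m < p := by omega
    have htlen : (pre.take (p - m)).length = p - m := by
      rw [List.length_take]; omega
    have hrevlen : ((fillF ch0 (List.replicate m '?')).reverse).length = m := by
      simp [length_fillF]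
    have hset : (pre.take (p - m) ++ (fillF ch0 (List.replicate m '?')).reverse ++ rest).set
        (p - m - 1) (flipC (flipC^[m] ch0))
        = pre.take (p - (m + 1)) ++ (fillF ch0 (List.replicate (m + 1) '?')).reverse ++ rest := by
      rw [List.set_append, if_pos (by simp [htlen, hrevlen]; omega)]
      rw [List.set_append, if_pos (by rw [htlen]; omega)]
      have htake : (pre.take (p - m)).set (p - m - 1) (flipC (flipC^[m] ch0))
          = pre.take (p - m - 1) ++ [flipC (flipC^[m] ch0)] := by
        have hidx : p - m - 1 < pre.length := by omega
        have : pre.take (p - m) = (pre.take (p - m - 1)).concat pre[p - m - 1] := by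
          rw [List.take_concat_get hidx]
          congr 1
          omega
        rw [this, List.concat_eq_append, List.set_append,
          if_neg (by rw [List.length_take]; omega)]
        have : p - m - 1 - (pre.take (p - m - 1)).length = 0 := by
          rw [List.length_take]; omega
        rw [this, List.set_cons_zero]
      rw [htake, chain_snoc]
      have : p - m - 1 = p - (m + 1) := by omega
      simp [this, Function.iterate_succ_apply', List.append_assoc]
    rw [hset]
    simp [Function.iterate_succ_apply']

theorem loopA_back (p : Nat) (pre rest : List Char) (hp : pre.length = p) (ch0 : Char) :
    (List.range p).foldl
      (fun (ac : List Char × Char) j => (ac.1.set (p - j - 1) (flipC ac.2), flipC ac.2))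
      (pre ++ rest, ch0)
    = ((fillF ch0 (List.replicate p '?')).reverse ++ rest, flipC^[p] ch0) := by
  have := loopA_back_aux p pre rest hp ch0 p le_rfl
  simpa using this

theorem foldRest (u : List Char) : ∀ (keep : List Char) (last : Char),
    ((gbQ u).foldl stepA' (keep ++ u, keep.length, last)).1 = keep ++ fillF last u := by
  induction u using gbQ.induct with
  | case1 => intro keep last; rw [gbQ_nil]; simp [fillF]
  | case2 c rest _k ih =>
    intro keep last
    rw [gbQ_cons]
    simp only [List.foldl_cons]
    set tw := rest.takeWhile (fun x => (x == '?') == (c == '?')) with htw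
    set dw := rest.dropWhile (fun x => (x == '?') == (c == '?')) with hdw
    have hsplit : rest = tw ++ dw := (List.takeWhile_append_dropWhile).symm
    by_cases hk : (c == '?') = true
    · -- a '?'-group: the inner loop writes the flip chain, then the remaining groups
      have hallv : ∀ x ∈ c :: tw, x = '?' := by
        intro x hx
        rcases List.mem_cons.mp hx with rfl | hx
        · simpa using hk
        · rw [htw] at hx
          have h2 : (x == '?') = (c == '?') := by
            have := List.mem_takeWhile_imp hx
            simpa using this
          rw [hk] at h2; simpa using h2
      have hrep : c :: tw = List.replicate (tw.length + 1) '?' :=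
        List.eq_replicate_iff.mpr ⟨by simp, hallv⟩
      have hdwhead : ∀ a, dw.head? = some a → (a == '?') = false := by
        intro a ha
        have h := List.head?_dropWhile_not (fun x => (x == '?') == (c == '?')) rest
        rw [← hdw, ha] at h
        simp only at h
        simpa [hk] using h
      have hlenv : (c :: tw).length = tw.length + 1 := by simp
      have hstep : stepA' (keep ++ c :: rest, keep.length, last) ((c == '?'), c :: tw)
          = (keep ++ fillF last (List.replicate (tw.length + 1) '?') ++ dw,
             keep.length + (tw.length + 1), last) := by
        rw [stepA']
        rw [hk]
        simp only [Bool.not_true, Bool.false_eq_true, if_false]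
        have hfold := loopA_fwd (tw.length + 1) keep (c :: rest) last
          (by rw [hsplit]; simp)
        simp only [hlenv]
        rw [hfold]
        have hdrop : (c :: rest).drop (tw.length + 1) = dw := by
          conv_lhs => rw [hsplit, show c :: (tw ++ dw) = (c :: tw) ++ dw from rfl]
          rw [← hlenv, List.drop_left]
        simp [hdrop]
      rw [hstep]
      have hkeep' : keep.length + (tw.length + 1)
          = (keep ++ fillF last (List.replicate (tw.length + 1) '?')).length := by
        simp [length_fillF]
      rw [hkeep', show keep ++ fillF last (List.replicate (tw.length + 1) '?') ++ dw
          = (keep ++ fillF last (List.replicate (tw.length + 1) '?')) ++ dw from rfl, ih]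
      -- now compute fillF last (c :: rest)
      conv_rhs => rw [hsplit, show c :: (tw ++ dw) = (c :: tw) ++ dw from rfl, fillF_append]
      rw [show fillF last (c :: tw) = fillF last (List.replicate (tw.length + 1) '?') from by rw [hrep]]
      rw [chain_getLastD]
      rw [fillF_indep (flipC^[tw.length + 1] last) last dw hdwhead]
      simp [List.append_assoc]
    · -- a fixed group: nothing is written, last becomes the group's last char
      have hallv : ∀ x ∈ c :: tw, (x == '?') = false := by
        intro x hx
        rcases List.mem_cons.mp hx with rfl | hx
        · simpa using hk
        · rw [htw] at hx
          have h2 : (x == '?') = (c == '?') := by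
            have := List.mem_takeWhile_imp hx
            simpa using this
          rw [h2]; simpa using hk
      have hstep : stepA' (keep ++ c :: rest, keep.length, last) ((c == '?'), c :: tw)
          = (keep ++ c :: rest, keep.length + (c :: tw).length, (c :: tw).getLastD 'B') := by
        rw [stepA']
        have : (c == '?') = false := by simpa using hk
        rw [this]
        simp
      rw [hstep]
      have harr : keep ++ c :: rest = (keep ++ c :: tw) ++ dw := by
        conv_lhs => rw [hsplit]
        simp
      have hlen : keep.length + (c :: tw).length = (keep ++ c :: tw).length := by simp
      rw [harr, hlen, ih]
      conv_rhs => rw [hsplit, show c :: (tw ++ dw) = (c :: tw) ++ dw from rfl, fillF_append]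
      rw [fillF_fixed last (c :: tw) hallv]
      rw [show (c :: tw).getLastD last = tw.getLastD c from List.getLastD_cons]
      rw [show (c :: tw).getLastD 'B' = tw.getLastD c from List.getLastD_cons]
      simp [List.append_assoc]

theorem backLoop_spec (p : Nat) : ∀ (t : List Char), p < t.length →
    backLoop t p = (fillF (t.getD p 'B') (List.replicate p '?')).reverse ++ t.drop p := by
  induction p with
  | zero => intro t _; simp [backLoop, fillF]
  | succ p ih =>
    intro t ht
    rw [backLoop]
    have hlt : p < t.length := by omega
    have hlen : p < (t.set p (flipC (t.getD (p + 1) 'B'))).length := by simp; omega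
    rw [ih _ hlen]
    have hget : (t.set p (flipC (t.getD (p + 1) 'B'))).getD p 'B' = flipC (t.getD (p + 1) 'B') := by
      rw [List.getD_eq_getElem _ _ hlen, List.getElem_set_self]
    have hdrop : (t.set p (flipC (t.getD (p + 1) 'B'))).drop p
        = flipC (t.getD (p + 1) 'B') :: t.drop (p + 1) := by
      rw [List.drop_eq_getElem_cons hlen, List.getElem_set_self]
      rw [List.drop_set, if_pos (by omega)]
    rw [hget, hdrop, chain_succ]
    simp

theorem fwdLoop_spec (t : List Char) (i : Nat) (hi : 1 ≤ i) :
    fwdLoop t i = t.take i ++ fillF (t.getD (i - 1) 'B') (t.drop i) := by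
  induction t, i using fwdLoop.induct with
  | case1 t i h hq ih =>
    rw [fwdLoop, dif_pos h, if_pos hq]
    rw [ih (by omega)]
    have hset : t.set i (flipC (t.getD (i - 1) 'B'))
        = t.take i ++ flipC (t.getD (i - 1) 'B') :: t.drop (i + 1) := by
      rw [List.set_eq_take_append_cons_drop, if_pos h]
    have hlentake : (t.take i).length = i := by rw [List.length_take]; omega
    have htake : (t.set i (flipC (t.getD (i - 1) 'B'))).take (i + 1)
        = t.take i ++ [flipC (t.getD (i - 1) 'B')] := by
      rw [hset, List.take_append, hlentake, List.take_of_length_le (by omega), Nat.add_sub_cancel_left]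
      simp
    have hgetd : (t.set i (flipC (t.getD (i - 1) 'B'))).getD (i + 1 - 1) 'B'
        = flipC (t.getD (i - 1) 'B') := by
      rw [Nat.add_sub_cancel, List.getD_eq_getElem _ _ (by simp; omega), List.getElem_set_self]
    have hdrop : (t.set i (flipC (t.getD (i - 1) 'B'))).drop (i + 1) = t.drop (i + 1) := by
      rw [List.drop_set, if_pos (by omega)]
    rw [htake, hgetd, hdrop]
    have hdropi : t.drop i = '?' :: t.drop (i + 1) := by
      rw [List.drop_eq_getElem_cons h]
      congr 1
      have := hq
      rw [List.getD_eq_getElem _ _ h] at this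
      simpa using this
    rw [hdropi]
    simp only [fillF]
    simp [List.append_assoc]
  | case2 t i h hq ih =>
    rw [fwdLoop, dif_pos h, if_neg hq]
    rw [ih (by omega)]
    have hti : (t.getD i 'B' == '?') = false := by
      cases hb : (t.getD i 'B' == '?') with
      | false => rfl
      | true => exact absurd hb hq
    have hdropi : t.drop i = t.getD i 'B' :: t.drop (i + 1) := by
      rw [List.drop_eq_getElem_cons h, List.getD_eq_getElem _ _ h]
    have htake : t.take (i + 1) = t.take i ++ [t.getD i 'B'] := by
      rw [List.getD_eq_getElem _ _ h, ← List.take_concat_get h]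
      simp
    rw [hdropi, htake, Nat.add_sub_cancel]
    simp only [fillF, hti]
    simp [List.append_assoc]
  | case3 t i h =>
    rw [fwdLoop, dif_neg h]
    rw [List.take_of_length_le (by omega), List.drop_of_length_le (by omega)]
    simp [fillF]

theorem B_mixed (cs : List Char) (h : findP cs < cs.length) :
    fwdLoop (backLoop cs (findP cs)) (findP cs + 1) = target cs (findP cs) := by
  set p := findP cs with hp
  have hb := backLoop_spec p cs h
  set rev := (fillF (cs.getD p 'B') (List.replicate p '?')).reverse with hrev
  have hrevlen : rev.length = p := by simp [hrev, length_fillF]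
  have hdropcs : cs.drop p = cs.getD p 'B' :: cs.drop (p + 1) := by
    rw [List.drop_eq_getElem_cons h, List.getD_eq_getElem _ _ h]
  rw [hb, fwdLoop_spec _ _ (by omega)]
  have h1 : (rev ++ cs.drop p).take (p + 1) = rev ++ [cs.getD p 'B'] := by
    rw [List.take_append, hrevlen, List.take_of_length_le (by omega), hdropcs]
    simp
  have h2 : (rev ++ cs.drop p).getD (p + 1 - 1) 'B' = cs.getD p 'B' := by
    rw [Nat.add_sub_cancel,
      List.getD_eq_getElem _ _ (by simp [hrevlen]; omega),
      List.getElem_append_right (by omega)]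
    simp [hrevlen, hdropcs]
  have h3 : (rev ++ cs.drop p).drop (p + 1) = cs.drop (p + 1) := by
    rw [List.drop_append, hrevlen, List.drop_of_length_le (by omega), hdropcs]
    simp
  rw [h1, h2, h3, target, ← hrev, hdropcs]
  have hcfix : (cs.getD p 'B' == '?') = false := getD_findP cs h
  simp only [fillF, hcfix]
  simp [List.append_assoc]

theorem A_mixed (cs : List Char) (h : findP cs < cs.length) :
    ((PySem.List.enumerate (gbQ cs) 0).foldl stepA (cs, 0, 'B')).1 = target cs (findP cs) := by
  cases cs with
  | nil => simp [findP] at h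
  | cons c rest =>
    rw [gbQ_cons, PySem.List.enumerate_cons, List.foldl_cons]
    by_cases hc : (c == '?') = true
    · -- leading '?'-group: A fills it backward from the first fixed char
      have hcq : c = '?' := by simpa using hc
      subst hcq
      have hpred : (fun x : Char => (x == '?') == ('?' == '?')) = (fun x : Char => x == '?') := by
        funext x
        simp
      have hpfind : findP ('?' :: rest) = findP rest + 1 := by simp [findP]
      set p := findP rest + 1 with hpdef
      have hplen : p ≤ ('?' :: rest).length := by
        have := findP_le ('?' :: rest)
        rw [hpfind] at this
        simpa using this
      have htw : List.takeWhile (fun x => (x == '?') == ('?' == '?')) rest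
          = List.replicate (findP rest) '?' := by rw [hpred, takeWhile_q]
      have hdw : List.dropWhile (fun x => (x == '?') == ('?' == '?')) rest
          = ('?' :: rest).drop p := by rw [hpred, dropWhile_q, hpdef, List.drop_succ_cons]
      have hv : '?' :: List.takeWhile (fun x => (x == '?') == ('?' == '?')) rest
          = List.replicate p '?' := by rw [htw, hpdef, List.replicate_succ]
      have hcs : '?' :: rest = List.replicate p '?' ++ ('?' :: rest).drop p := by
        conv_lhs => rw [← List.take_append_drop p ('?' :: rest)]
        congr 1
        have := take_findP ('?' :: rest)
        rw [hpfind] at this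
        exact this
      rw [hv, hdw]
      -- the first step of the fold (gi = 0, k = true)
      rw [stepA]
      simp only [List.length_replicate, beq_self_eq_true, Bool.not_true, Bool.false_eq_true,
        if_false, if_true]
      have hinner := loopA_back p (List.replicate p '?') (List.drop p ('?' :: rest))
        (by simp) (('?' :: rest).getD p 'B')
      rw [← hcs] at hinner
      rw [hinner]
      rw [foldl_enum _ _ (0 + 1) (by omega)]
      set rev := (fillF (('?' :: rest).getD p 'B') (List.replicate p '?')).reverse with hrevdef
      have hrevlen : rev.length = p := by simp [hrevdef, length_fillF]
      rw [show (0 : Nat) + p = rev.length from by omega]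
      rw [foldRest (List.drop p ('?' :: rest)) rev 'B']
      rw [target, hpfind]
    · -- leading fixed group: A records last = v[-1] and moves on
      have hp0 : findP (c :: rest) = 0 := by simp [findP, hc]
      set tw := rest.takeWhile (fun x => (x == '?') == (c == '?')) with htw
      set dw := rest.dropWhile (fun x => (x == '?') == (c == '?')) with hdw
      have hsplit : rest = tw ++ dw := (List.takeWhile_append_dropWhile).symm
      have hallv : ∀ x ∈ c :: tw, (x == '?') = false := by
        intro x hx
        rcases List.mem_cons.mp hx with rfl | hx
        · simpa using hc
        · rw [htw] at hx
          have h2 : (x == '?') = (c == '?') := by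
            have := List.mem_takeWhile_imp hx
            simpa using this
          rw [h2]; simpa using hc
      have hstep : stepA (c :: rest, 0, 'B') ((0 : Int), (c == '?'), c :: tw)
          = (c :: rest, 0 + (c :: tw).length, (c :: tw).getLastD 'B') := by
        rw [stepA]
        have hcf : (c == '?') = false := by simpa using hc
        rw [hcf]
        simp
      rw [hstep]
      rw [foldl_enum _ _ (0 + 1) (by omega)]
      have harr : c :: rest = (c :: tw) ++ dw := by rw [hsplit]; rfl
      have hstate : ((c :: rest, 0 + (c :: tw).length, (c :: tw).getLastD 'B')
          : List Char × Nat × Char)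
          = ((c :: tw) ++ dw, ((c :: tw) : List Char).length, (c :: tw).getLastD 'B') := by
        rw [← harr]
        simp
      rw [hstate, foldRest dw (c :: tw) ((c :: tw).getLastD 'B')]
      have hfinal : fillF 'B' (c :: rest) = (c :: tw) ++ fillF ((c :: tw).getLastD 'B') dw := by
        conv_lhs => rw [harr]
        rw [fillF_append, fillF_fixed 'B' (c :: tw) hallv]
      rw [target, hp0]
      simp only [List.replicate_zero, List.drop_zero]
      rw [hfinal]
      simp [fillF]

theorem solve_eq (n : Int) (s : String) : solve n s = solve_alt n s := by
  by_cases hq : '?' ∈ s.toList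
  · have hcont : (s.toList.contains '?') = true := by simpa using hq
    by_cases hall : findP s.toList = s.toList.length
    · -- s consists only of '?': both return the alternating string of length n
      have hne : s.toList ≠ [] := by
        intro h0
        rw [h0] at hq
        simp at hq
      have hrep := take_findP s.toList
      rw [hall, List.take_length] at hrep
      have hallq : ∀ x ∈ s.toList, (x == '?') = true := by
        intro x hx
        rw [hrep] at hx
        simp [List.eq_of_mem_replicate hx]
      have hA := gbQ_all _ true hne hallq
      rw [solve, solve_alt]
      simp [hA, hcont, hall, hq]
    · -- mixed: both compute target
      have hlt := lt_of_le_of_ne (findP_le s.toList) hall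
      have hne1 : (gbQ s.toList).length ≠ 1 := by
        intro hlen1
        obtain ⟨g, hg⟩ := List.length_eq_one_iff.mp hlen1
        obtain ⟨k, v⟩ := g
        have hkeys := gbQ_single_key _ _ _ hg
        have hk : k = true := by simpa using (hkeys '?' hq).symm
        have hallq : ∀ x ∈ s.toList, x = '?' := by
          intro x hx
          have := hkeys x hx
          rw [hk] at this
          simpa using this
        exact hall (findP_all_q _ hallq)
      rw [solve, solve_alt]
      simp only [hcont, Bool.not_true, Bool.false_eq_true, if_false,
        show ((gbQ s.toList).length == 1) = false from by simpa using hne1,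
        show ((findP s.toList == s.toList.length) : Bool) = false from by simpa using hall]
      rw [A_mixed _ hlt, B_mixed _ hlt]
  · -- no '?': both return s unchanged
    have hcont : (s.toList.contains '?') = false := by simpa using hq
    rw [solve_alt]
    simp only [hcont, Bool.not_false, if_true]
    cases hcs : s.toList with
    | nil =>
      rw [solve]
      simp only [hcs, gbQ_nil, List.length_nil, PySem.List.enumerate_nil, List.foldl_nil]
      rw [show ((0 == 1) : Bool) = false from rfl]
      simp only [Bool.false_eq_true, if_false]
      rw [← hcs]
      simp [String.mk]
    | cons c rest =>
      have hA := gbQ_all s.toList false (by simp [hcs])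
        (fun x hx => by
          have : x ≠ '?' := fun e => hq (e ▸ hx)
          simp [this])
      rw [solve]
      simp [hA]


-- ===== VERDICT (by name: the statement is the Claim_ definition above) =====
theorem solve_spec : Claim_equal_solve := by
  intro n s _
  unfold Spec_solve
  exact solve_eq n s
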